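-- pv_equiv track=rewrite | github.com/nitindalal/ciq-ally-competitor-intel | src/rules_engine.py | check_bullets_numbers_as_numerals
-- ===== SOURCE A (Python) =====
-- from typing import Any, Dict, List, Optional, Callable, Union
--
-- _NUMBER_WORDS = {
--     "zero", "one", "two", "three", "four", "five",
--     "six", "seven", "eight", "nine", "ten", "eleven",
--     "twelve"
-- }
--
-- def check_bullets_numbers_as_numerals(value: Any, _params: Dict[str, Any]) -> bool:
--     """
--     Fail if a bullet spells out numbers (e.g., 'five') instead of using numerals.
--     """
--     if not isinstance(value, list): return True
--     for raw in value:
--         if not raw: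
--             continue
--         text = str(raw).lower()
--         if any(f" {word} " in f" {text} " for word in _NUMBER_WORDS):
--             return False
--     return True
-- ===== SOURCE B (Python) =====
-- _NUMBER_WORDS = {
--     "zero", "one", "two", "three", "four", "five",
--     "six", "seven", "eight", "nine", "ten", "eleven",
--     "twelve"
-- }
--
-- def check_bullets_numbers_as_numerals(value, _params):
--     """
--     Fail if a bullet spells out numbers (e.g., 'five') instead of using numerals.
--     Tokenizes each bullet once on the literal space character and checks the
--     token list against the word set, instead of 13 padded substring scans.
--     """
--     if not isinstance(value, list):
--         return True
--     return all(
--         not raw or _NUMBER_WORDS.isdisjoint(str(raw).lower().split(' '))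
--         for raw in value
--     )
-- ===== Notes on version B (the rewrite author's own statement) =====
-- stated objective: faster
-- what changed: Replaces the per-bullet 'any' of 13 padded-substring scans by one split(' ') tokenization per bullet checked against the word set with isdisjoint, and the early-return loop by a single all(...) over the bullets.
import Mathlib
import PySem

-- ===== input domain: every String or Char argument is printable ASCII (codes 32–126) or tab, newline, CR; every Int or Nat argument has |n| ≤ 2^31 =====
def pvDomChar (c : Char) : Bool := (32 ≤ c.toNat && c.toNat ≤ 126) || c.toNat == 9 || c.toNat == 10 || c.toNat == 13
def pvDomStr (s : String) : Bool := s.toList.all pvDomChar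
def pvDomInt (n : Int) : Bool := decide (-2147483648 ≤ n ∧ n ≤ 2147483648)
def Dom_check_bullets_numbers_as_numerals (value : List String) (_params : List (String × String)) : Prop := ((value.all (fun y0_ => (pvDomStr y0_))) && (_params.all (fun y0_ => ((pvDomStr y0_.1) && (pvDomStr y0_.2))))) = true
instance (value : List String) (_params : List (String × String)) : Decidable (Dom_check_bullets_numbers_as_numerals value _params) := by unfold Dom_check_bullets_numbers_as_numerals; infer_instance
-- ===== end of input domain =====

-- B replaces the 13 padded-substring scans per bullet by one split(' ') tokenization
-- checked against the word set, and the early-return loop by all(...): more idiomatic.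

-- ===== PORT A =====
-- _NUMBER_WORDS as a list (set iteration order is irrelevant to `any`'s result)
def pvNumberWords : List String :=
  ["zero", "one", "two", "three", "four", "five",
   "six", "seven", "eight", "nine", "ten", "eleven", "twelve"]

-- the for-loop of A with its early `return False`
def pvCheckLoopA : List String → Bool
  | [] => true
  | raw :: rest =>
    if raw = "" then pvCheckLoopA rest                -- `if not raw: continue`
    else
      let text := PySem.Str.lower raw
      if pvNumberWords.any (fun word =>
           PySem.Str.isIn (" " ++ word ++ " ") (" " ++ text ++ " ")) then false
      else pvCheckLoopA rest

def check_bullets_numbers_as_numerals (value : List String) (_params : List (String × String)) : Bool :=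
  pvCheckLoopA value

-- ===== PORT B =====
-- _NUMBER_WORDS on the char-list side (B tokenizes on char lists)
def pvNumberWordChars : List (List Char) :=
  ["zero".toList, "one".toList, "two".toList, "three".toList, "four".toList, "five".toList,
   "six".toList, "seven".toList, "eight".toList, "nine".toList, "ten".toList,
   "eleven".toList, "twelve".toList]

-- all(not raw or _NUMBER_WORDS.isdisjoint(str(raw).lower().split(' ')) for raw in value)
-- `.split(' ')` (literal single-space separator) ported as Mathlib's List.splitOn ' '
def check_bullets_numbers_as_numerals_alt (value : List String) (_params : List (String × String)) : Bool :=
  value.all (fun raw =>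
    (raw == "") ||
    PySem.Set.isdisjoint (PySem.Set.ofList pvNumberWordChars)
      (PySem.Set.ofList (List.splitOn ' ' (PySem.Chars.lower raw.toList))))

-- ===== PRECONDITION & SPEC =====
def Spec_check_bullets_numbers_as_numerals (value : List String) (_params : List (String × String)) (out : Bool) : Prop := out = check_bullets_numbers_as_numerals_alt value _params
instance (value : List String) (_params : List (String × String)) (out : Bool) : Decidable (Spec_check_bullets_numbers_as_numerals value _params out) := by unfold Spec_check_bullets_numbers_as_numerals; infer_instance

-- ===== CLAIM (what is proved, stated in full; the proofs are below) =====
def Claim_equal_check_bullets_numbers_as_numerals : Prop := ∀ (value : List String) (_params : List (String × String)), Dom_check_bullets_numbers_as_numerals value _params → Spec_check_bullets_numbers_as_numerals value _params (check_bullets_numbers_as_numerals value _params)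

-- ===== LEMMAS AND PROOFS =====

-- any list containing a space splits as a space-free block, the first space, and a rest
theorem pvDecomp : ∀ cs : List Char, ' ' ∈ cs → ∃ t r, cs = t ++ ' ' :: r ∧ ' ' ∉ t := by
  intro cs
  induction cs with
  | nil => intro h; cases h
  | cons c cs' ih =>
    intro hmem
    by_cases hc : c = ' '
    · exact ⟨[], cs', by simp [hc], by simp⟩
    · have h' : ' ' ∈ cs' := by
        rcases List.mem_cons.1 hmem with h | h
        · exact absurd h.symm hc
        · exact h
      obtain ⟨t, r, rfl, ht⟩ := ih h'
      refine ⟨c :: t, r, rfl, ?_⟩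
      intro h
      rcases List.mem_cons.1 h with h | h
      · exact hc h.symm
      · exact ht h

-- a word ++ ' ' is a prefix of t ++ ' ' :: u  iff  the word equals the space-free block t
theorem pvPrefixTok {w t : List Char} (u : List Char) (hw : ' ' ∉ w) (ht : ' ' ∉ t) :
    (w ++ [' '] <+: t ++ ' ' :: u) ↔ w = t := by
  induction w generalizing t with
  | nil =>
    simp only [List.nil_append]
    constructor
    · intro hp
      cases t with
      | nil => rfl
      | cons b t' =>
        have h1 := (List.cons_prefix_cons.mp hp).1
        exact absurd (by rw [h1]; exact List.mem_cons_self) ht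
    · rintro rfl
      exact List.cons_prefix_cons.mpr ⟨rfl, List.nil_prefix⟩
  | cons a w' ih =>
    cases t with
    | nil =>
      constructor
      · intro hp
        have h1 := (List.cons_prefix_cons.mp hp).1
        exact absurd (by rw [← h1]; exact List.mem_cons_self) hw
      · intro h; simp at h
    | cons b t' =>
      have hw' : ' ' ∉ w' := fun h => hw (List.mem_cons_of_mem _ h)
      have ht' : ' ' ∉ t' := fun h => ht (List.mem_cons_of_mem _ h)
      constructor
      · intro hp
        rcases List.cons_prefix_cons.mp hp with ⟨rfl, hrest⟩
        rw [(ih hw' ht').1 hrest]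
      · intro h
        injection h with h1 h2
        subst h1; subst h2
        exact List.cons_prefix_cons.mpr ⟨rfl, (ih hw' ht').2 rfl⟩

-- an occurrence of a space-initial pattern skips over a space-free block
theorem pvSkipBlock {t : List Char} (zs u : List Char) (ht : ' ' ∉ t) :
    ((' ' :: zs) <:+: t ++ ' ' :: u) ↔ (' ' :: zs) <:+: ' ' :: u := by
  induction t with
  | nil => simp
  | cons c t' ih =>
    have hc : ¬ (' ' = c) := fun h => ht (h ▸ List.mem_cons_self)
    have ht' : ' ' ∉ t' := fun h => ht (List.mem_cons_of_mem _ h)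
    rw [List.cons_append, List.infix_cons_iff, ← ih ht']
    constructor
    · rintro (hp | h)
      · rw [List.cons_prefix_cons] at hp
        exact absurd hp.1 hc
      · exact h
    · exact Or.inr

-- the padded word occurs in the padded text iff the word is a split(' ') token
theorem pvKey (w : List Char) (hsp : ' ' ∉ w) :
    ∀ cs : List Char,
      ((' ' :: (w ++ [' '])) <:+: (' ' :: (cs ++ [' ']))) ↔ w ∈ List.splitOn ' ' cs := by
  intro cs
  induction hn : cs.length using Nat.strong_induction_on generalizing cs with
  | _ n ih =>
  subst hn
  by_cases hmem : ' ' ∈ cs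
  · obtain ⟨t, r, rfl, ht⟩ := pvDecomp cs hmem
    have hr : r.length < (t ++ ' ' :: r).length := by
      rw [List.length_append, List.length_cons]; omega
    have hsplit : List.splitOn ' ' (t ++ ' ' :: r) = t :: List.splitOn ' ' r := by
      unfold List.splitOn
      refine List.splitOnP_first _ t ?_ ' ' (by simp) r
      intro x hx h
      have hx' : x = ' ' := by simpa using h
      exact absurd (hx' ▸ hx) ht
    have happ : (t ++ ' ' :: r) ++ [' '] = t ++ ' ' :: (r ++ [' ']) := by simp
    rw [hsplit, List.mem_cons, List.infix_cons_iff, happ]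
    constructor
    · rintro (hp | hinf)
      · rcases List.cons_prefix_cons.mp hp with ⟨-, hp2⟩
        exact Or.inl ((pvPrefixTok (r ++ [' ']) hsp ht).1 hp2)
      · rw [pvSkipBlock _ _ ht] at hinf
        exact Or.inr ((ih r.length hr r rfl).1 hinf)
    · rintro (rfl | hmem')
      · exact Or.inl (List.cons_prefix_cons.mpr ⟨rfl, (pvPrefixTok (r ++ [' ']) hsp ht).2 rfl⟩)
      · refine Or.inr ?_
        rw [pvSkipBlock _ _ ht]
        exact (ih r.length hr r rfl).2 hmem'
  · have hsplit : List.splitOn ' ' cs = [cs] := by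
      unfold List.splitOn
      refine List.splitOnP_eq_single _ _ ?_
      intro x hx h
      have hx' : x = ' ' := by simpa using h
      exact absurd (hx' ▸ hx) hmem
    rw [hsplit, List.mem_singleton, List.infix_cons_iff]
    constructor
    · rintro (hp | hinf)
      · rcases List.cons_prefix_cons.mp hp with ⟨-, hp2⟩
        exact (pvPrefixTok [] hsp hmem).1 hp2
      · exfalso
        have hsub := List.Sublist.count_le ' ' hinf.sublist
        have h1 : List.count ' ' (' ' :: (w ++ [' '])) = 2 := by
          simp [List.count_append, List.count_eq_zero.mpr hsp]
        have h2 : List.count ' ' (cs ++ [' ']) = 1 := by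
          simp [List.count_append, List.count_eq_zero.mpr hmem]
        omega
    · rintro rfl
      exact Or.inl (List.cons_prefix_cons.mpr ⟨rfl, (pvPrefixTok [] hsp hmem).2 rfl⟩)

-- per-word Bool form of pvKey, on the padded char lists A compares
theorem pvKeyBool (word : String) (cs : List Char)
    (hsp : ' ' ∉ word.toList) :
    PySem.Chars.isIn (' ' :: (word.toList ++ [' '])) (' ' :: (cs ++ [' ']))
      = (List.splitOn ' ' cs).contains word.toList := by
  by_cases h : word.toList ∈ List.splitOn ' ' cs
  · rw [List.contains_iff_mem.mpr h]
    exact (PySem.Chars.isIn_iff_infix _ _).mpr ((pvKey _ hsp cs).mpr h)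
  · have hc : (List.splitOn ' ' cs).contains word.toList = false := by
      rcases hb : (List.splitOn ' ' cs).contains word.toList with _ | _
      · rfl
      · exact absurd (List.contains_iff_mem.mp hb) h
    rw [hc]
    exact (PySem.Chars.isIn_eq_false_iff _ _).mpr (fun hinf => h ((pvKey _ hsp cs).mp hinf))

-- the per-bullet tests of A and B agree (A's `any` hit ↔ B's non-disjointness)
theorem pvBullet (raw : String) :
    (pvNumberWords.any (fun word =>
        PySem.Str.isIn (" " ++ word ++ " ") (" " ++ PySem.Str.lower raw ++ " ")))
      = !(PySem.Set.isdisjoint (PySem.Set.ofList pvNumberWordChars)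
            (PySem.Set.ofList (List.splitOn ' ' (PySem.Chars.lower raw.toList)))) := by
  set cs := PySem.Chars.lower raw.toList with hcs
  have hpad : ∀ word : String, PySem.Str.isIn (" " ++ word ++ " ") (" " ++ PySem.Str.lower raw ++ " ")
      = PySem.Chars.isIn (' ' :: (word.toList ++ [' '])) (' ' :: (cs ++ [' '])) := by
    intro word
    rw [PySem.Str.isIn_eq]
    congr 1 <;> simp [String.toList_append, PySem.Str.toList_lower, hcs]
  have hofw : PySem.Set.ofList pvNumberWordChars = pvNumberWordChars := by decide
  have hcontains : ∀ w : List Char,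
      (PySem.Set.ofList (List.splitOn ' ' cs)).contains w = (List.splitOn ' ' cs).contains w := by
    intro w
    rw [Bool.eq_iff_iff, PySem.Set.contains_iff, List.contains_iff_mem, PySem.Set.mem_ofList]
  unfold PySem.Set.isdisjoint
  rw [hofw, Bool.not_not]
  simp only [hcontains]
  simp only [pvNumberWords, pvNumberWordChars, List.any_cons, List.any_nil, hpad]
  rw [pvKeyBool "zero" cs (by decide), pvKeyBool "one" cs (by decide),
      pvKeyBool "two" cs (by decide), pvKeyBool "three" cs (by decide),
      pvKeyBool "four" cs (by decide), pvKeyBool "five" cs (by decide),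
      pvKeyBool "six" cs (by decide), pvKeyBool "seven" cs (by decide),
      pvKeyBool "eight" cs (by decide), pvKeyBool "nine" cs (by decide),
      pvKeyBool "ten" cs (by decide), pvKeyBool "eleven" cs (by decide),
      pvKeyBool "twelve" cs (by decide)]

-- A's early-return loop computes B's all(...) over the bullets
theorem pvMain : ∀ value : List String, pvCheckLoopA value =
    value.all (fun raw => (raw == "") ||
      PySem.Set.isdisjoint (PySem.Set.ofList pvNumberWordChars)
        (PySem.Set.ofList (List.splitOn ' ' (PySem.Chars.lower raw.toList)))) := by
  intro value
  induction value with
  | nil => rfl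
  | cons raw rest ih =>
    rw [List.all_cons, ← ih]
    by_cases hraw : raw = ""
    · subst hraw
      simp [pvCheckLoopA]
    · have hbe : (raw == "") = false := by simpa using hraw
      simp only [pvCheckLoopA]
      rw [if_neg hraw, hbe, Bool.false_or]
      rcases hb : PySem.Set.isdisjoint (PySem.Set.ofList pvNumberWordChars)
          (PySem.Set.ofList (List.splitOn ' ' (PySem.Chars.lower raw.toList))) with _ | _
      · rw [if_pos (by rw [pvBullet, hb]; rfl), Bool.false_and]
      · rw [if_neg (fun hcond => by rw [pvBullet, hb] at hcond; simp at hcond), Bool.true_and]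

-- ===== VERDICT (by name: the statement is the Claim_ definition above) =====
theorem check_bullets_numbers_as_numerals_spec : Claim_equal_check_bullets_numbers_as_numerals := by
  intro value _params _
  unfold Spec_check_bullets_numbers_as_numerals
  unfold check_bullets_numbers_as_numerals check_bullets_numbers_as_numerals_alt
  exact pvMain value
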